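-- pv_equiv track=rewrite | github.com/valerieyew/volunteer_fyp | services/transport/src/service/data_processing.py | get_data_consolidated
-- ===== SOURCE A (Python) =====
-- def get_data_consolidated(data, final_venue):
--     data_numbers = {}
--     # {'Tuas Crescent MRT Station': 6,
--     #  'Pioneer MRT Station': 18,}
--
--     data_coordinates = {}
--     # {'Tuas Crescent MRT Station': ['1.32102695188066', '103.649078232635'],
--     #  'Pioneer MRT Station': ['1.33758688240768', '103.697321513018']}
--
--     data_list = []
--     # unique locations
--     # [['Tuas Crescent MRT Station', '1.32102695188066', '103.649078232635'],
--     #  ['Pioneer MRT Station', '1.33758688240768', '103.697321513018']]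
--
--     for location in data:
--         if data_numbers.get(location[0]) is not None:
--             no_of_this_location = data_numbers[location[0]]
--             no_of_this_location += 1
--             data_numbers[location[0]] = no_of_this_location
--         else:
--             data_numbers[location[0]] = 1
--             data_coordinates[location[0]] = location[1:3]
--             data_list.append(location)
--
--     data_list_with_final_venue = data_list.copy()
--     data_list_with_final_venue.append(final_venue)
--
--     return data_numbers, data_coordinates, data_list, data_list_with_final_venue
-- ===== SOURCE B (Python) =====
-- def get_data_consolidated(data, final_venue):
--     # pass 1: unique locations in first-occurrence order
--     seen = set()
--     data_list = []
--     for location in data: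
--         if location[0] not in seen:
--             seen.add(location[0])
--             data_list.append(location)
--     # pass 2: coordinates derived from the unique list
--     data_coordinates = {location[0]: location[1:3] for location in data_list}
--     # pass 3: occurrence counts
--     data_numbers = {}
--     for location in data:
--         data_numbers[location[0]] = data_numbers.get(location[0], 0) + 1
--     return data_numbers, data_coordinates, data_list, data_list + [final_venue]
-- ===== Notes on version B (the rewrite author's own statement) =====
-- stated objective: simpler
-- what changed: A's single interleaved loop maintaining three structures at once is split into three independent passes: a seen-set loop building the unique list, a comprehension deriving coordinates from it, and a separate counting loop.
import Mathlib
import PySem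

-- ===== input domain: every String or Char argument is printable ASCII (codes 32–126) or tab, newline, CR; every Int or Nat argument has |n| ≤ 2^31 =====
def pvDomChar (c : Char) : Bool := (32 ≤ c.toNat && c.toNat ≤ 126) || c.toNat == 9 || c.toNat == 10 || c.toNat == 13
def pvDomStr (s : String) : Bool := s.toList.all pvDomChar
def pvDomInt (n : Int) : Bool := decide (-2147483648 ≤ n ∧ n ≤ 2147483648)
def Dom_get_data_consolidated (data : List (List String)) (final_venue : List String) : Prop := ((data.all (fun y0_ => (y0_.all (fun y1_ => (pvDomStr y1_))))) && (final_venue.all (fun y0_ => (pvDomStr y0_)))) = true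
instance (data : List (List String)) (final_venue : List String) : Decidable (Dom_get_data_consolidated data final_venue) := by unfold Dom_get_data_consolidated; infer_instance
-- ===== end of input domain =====

-- B splits A's single interleaved loop into three independent passes (unique list, coords map over it, count loop); same cost, simpler.


-- shared tiny helper: location[0] (total form; Pre_ guarantees the list is nonempty, where it equals Python's location[0])
def pvKey (loc : List String) : String := PySem.List.pyGetD loc 0 ""

-- ===== PORT A =====
-- one fused loop over data updating (data_numbers, data_coordinates, data_list) together
def pvStepA (st : PySem.Dict String Int × PySem.Dict String (List String) × List (List String))
    (loc : List String) :
    PySem.Dict String Int × PySem.Dict String (List String) × List (List String) :=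
  match st.1.get? (pvKey loc) with
  | some n => (st.1.insert (pvKey loc) (n + 1), st.2.1, st.2.2)
  | none   => (st.1.insert (pvKey loc) 1,
               st.2.1.insert (pvKey loc) (PySem.List.slice loc (some 1) (some 3)),
               st.2.2 ++ [loc])

def get_data_consolidated (data : List (List String)) (final_venue : List String) : (List (String × Int)) × (List (String × List String)) × List (List String) × List (List String) :=
  let st := data.foldl pvStepA (PySem.Dict.empty, PySem.Dict.empty, ([] : List (List String)))
  (st.1.items, st.2.1.items, st.2.2, st.2.2 ++ [final_venue])

-- ===== PORT B =====
-- pass 1: unique locations with a seen set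
def pvStepUniq (st : PySem.Set String × List (List String)) (loc : List String) :
    PySem.Set String × List (List String) :=
  if PySem.Set.contains st.1 (pvKey loc) then st
  else (PySem.Set.add st.1 (pvKey loc), st.2 ++ [loc])

-- pass 2: the coordinates entry for one unique location
def pvPair (loc : List String) : String × List String := (pvKey loc, PySem.List.slice loc (some 1) (some 3))

-- pass 3: counting loop
def pvStepNum (d : PySem.Dict String Int) (loc : List String) : PySem.Dict String Int :=
  d.insert (pvKey loc) (d.getD (pvKey loc) 0 + 1)

def get_data_consolidated_alt (data : List (List String)) (final_venue : List String) : (List (String × Int)) × (List (String × List String)) × List (List String) × List (List String) :=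
  let data_list := (data.foldl pvStepUniq (PySem.Set.empty, ([] : List (List String)))).2
  let data_coordinates := data_list.map pvPair
  let data_numbers := data.foldl pvStepNum PySem.Dict.empty
  (data_numbers.items, data_coordinates, data_list, data_list ++ [final_venue])

-- ===== PRECONDITION & SPEC =====
-- Pre_ excludes exactly the inputs where Python A raises IndexError: a location with no elements (location[0]).
def Pre_get_data_consolidated (data : List (List String)) (final_venue : List String) : Prop :=
  ∀ loc ∈ data, loc ≠ []
instance (data : List (List String)) (final_venue : List String) : Decidable (Pre_get_data_consolidated data final_venue) := by unfold Pre_get_data_consolidated; infer_instance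

def pvWitness_get_data_consolidated : List (List String) × List String :=
  ([["a", "1.1", "2.2"], ["b", "3.3", "4.4"], ["a", "1.1", "2.2"]], ["v", "5.5", "6.6"])

def Spec_get_data_consolidated (data : List (List String)) (final_venue : List String) (out : (List (String × Int)) × (List (String × List String)) × List (List String) × List (List String)) : Prop := out = get_data_consolidated_alt data final_venue
instance (data : List (List String)) (final_venue : List String) (out : (List (String × Int)) × (List (String × List String)) × List (List String) × List (List String)) : Decidable (Spec_get_data_consolidated data final_venue out) := by unfold Spec_get_data_consolidated; infer_instance

-- ===== CLAIM (what is proved, stated in full; the proofs are below) =====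
def Claim_equal_get_data_consolidated : Prop := ∀ (data : List (List String)) (final_venue : List String), Dom_get_data_consolidated data final_venue → Pre_get_data_consolidated data final_venue → Spec_get_data_consolidated data final_venue (get_data_consolidated data final_venue)

-- ===== LEMMAS AND PROOFS =====

-- the loop invariant: A's fused fold tracked against B's three passes, from related accumulators
lemma pv_main (data : List (List String)) :
    ∀ (dn : PySem.Dict String Int) (dc : PySem.Dict String (List String))
      (dl : List (List String)) (seen : PySem.Set String),
    (∀ k, (dn.get? k).isSome = true ↔ k ∈ seen) →
    dc.items = dl.map pvPair →
    (∀ k, dc.contains k = true → k ∈ seen) →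
    (data.foldl pvStepA (dn, dc, dl)).1 = data.foldl pvStepNum dn ∧
    (data.foldl pvStepA (dn, dc, dl)).2.1.items
      = (data.foldl pvStepUniq (seen, dl)).2.map pvPair ∧
    (data.foldl pvStepA (dn, dc, dl)).2.2 = (data.foldl pvStepUniq (seen, dl)).2 := by
  induction data with
  | nil => intro dn dc dl seen h1 h2 _; exact ⟨rfl, by simpa using h2, rfl⟩
  | cons loc rest ih =>
    intro dn dc dl seen h1 h2 h3
    simp only [List.foldl_cons]
    by_cases hmem : pvKey loc ∈ seen
    · -- key already counted: A bumps the count, B's uniq pass skips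
      have hc : (dn.get? (pvKey loc)).isSome = true := (h1 _).mpr hmem
      obtain ⟨n, hn⟩ := Option.isSome_iff_exists.mp hc
      have hA : pvStepA (dn, dc, dl) loc = (dn.insert (pvKey loc) (n + 1), dc, dl) := by
        simp [pvStepA, hn]
      have hB : pvStepUniq (seen, dl) loc = (seen, dl) := by
        simp [pvStepUniq, hmem]
      have hN : pvStepNum dn loc = dn.insert (pvKey loc) (n + 1) := by
        simp [pvStepNum, PySem.Dict.getD_of_get?_eq_some dn 0 hn]
      rw [hA, hB, hN]
      refine ih _ _ _ _ ?_ h2 h3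
      intro k
      rw [PySem.Dict.get?_insert]
      split_ifs with h
      · subst h; simp [hmem]
      · exact h1 k
    · -- new key: A records count 1, coordinates, appends; B's uniq pass appends too
      have hn : dn.get? (pvKey loc) = none := by
        rcases hopt : dn.get? (pvKey loc) with _ | v
        · rfl
        · exact absurd ((h1 _).mp (by rw [hopt]; rfl)) hmem
      have hdc : dc.contains (pvKey loc) = false :=
        Bool.eq_false_iff.mpr (fun hb => hmem (h3 _ hb))
      have hA : pvStepA (dn, dc, dl) loc
          = (dn.insert (pvKey loc) 1,
             dc.insert (pvKey loc) (PySem.List.slice loc (some 1) (some 3)), dl ++ [loc]) := by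
        simp [pvStepA, hn]
      have hB : pvStepUniq (seen, dl) loc
          = (PySem.Set.add seen (pvKey loc), dl ++ [loc]) := by
        simp [pvStepUniq, hmem]
      have hN : pvStepNum dn loc = dn.insert (pvKey loc) 1 := by
        simp [pvStepNum, PySem.Dict.getD_of_get?_eq_none dn 0 hn]
      rw [hA, hB, hN]
      refine ih _ _ _ _ ?_ ?_ ?_
      · intro k
        rw [PySem.Dict.get?_insert]
        split_ifs with h
        · subst h; simp [PySem.Set.mem_add]
        · rw [PySem.Set.mem_add]; simp only [h, or_false]; exact h1 k
      · rw [PySem.Dict.items_insert_of_not_contains dc _ hdc, h2]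
        simp [pvPair]
      · intro k hk
        rw [PySem.Dict.contains_insert] at hk
        rw [PySem.Set.mem_add]
        rcases Bool.or_eq_true_iff.mp hk with h | h
        · exact Or.inr (eq_of_beq h)
        · exact Or.inl (h3 k h)

-- ===== VERDICT (by name: the statement is the Claim_ definition above) =====
theorem get_data_consolidated_spec : Claim_equal_get_data_consolidated := by
  intro data final_venue _ _
  unfold Spec_get_data_consolidated get_data_consolidated get_data_consolidated_alt
  obtain ⟨h1, h2, h3⟩ := pv_main data PySem.Dict.empty PySem.Dict.empty [] PySem.Set.empty
    (by intro k; simp [PySem.Dict.get?_empty, PySem.Set.empty]) rfl (by intro k h; simp [PySem.Dict.contains_empty] at h)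
  simp only []
  rw [h1, h2, h3]
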